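-- pv_equiv track=rewrite | github.com/szawel/do-bot-bar | lib/basic_divider.py | BasicDivider
-- ===== SOURCE A (Python) =====
-- def BasicDivider( data, orders_list ):
--
--
--     orders = orders_list
--
--     order_index = []
--     chunks = []
--     out_data = []
--
--     # 1. Check if user input contains any data
--
--     if len(data)==0:
--         out_data = []
--     else:
--
--         # 2. Split data
--         data = data.split()
--
--         # 3. Finde division index
--         for x in range(len(data)):
--             if data[x] in orders:
--                 order_index.append(x)
--             else:
--                 pass
--
--         # add lenght of data on the end of order_index
--         order_index.append(len(data))
--
--         # 4. Divide data in to chunks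
--         for x in range(len(order_index)-1):
--             chunk = list(data[order_index[x]:order_index[x+1]])
--             chunks.append(chunk)
--
--         # 5. Join chunks in to single objects
--         for x in range(len(chunks)):
--             chunks[x] = chunks[x] = " ".join(chunks[x])
--             out_data.append(chunks[x])
--
--
--     return out_data
-- ===== SOURCE B (Python) =====
-- def BasicDivider(data, orders_list):
--     if len(data) == 0:
--         return []
--     out_data = []
--     current = None
--     for token in data.split():
--         if token in orders_list:
--             if current is not None:
--                 out_data.append(" ".join(current))
--             current = [token]
--         elif current is not None:
--             current.append(token)
--     if current is not None:
--         out_data.append(" ".join(current))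
--     return out_data
-- ===== Notes on version B (the rewrite author's own statement) =====
-- stated objective: simpler
-- what changed: Replaced A's three passes (collect keyword indices, slice between consecutive indices, join each slice) by a single pass over the tokens that accumulates one current chunk and flushes it at each keyword boundary.
import Mathlib
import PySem

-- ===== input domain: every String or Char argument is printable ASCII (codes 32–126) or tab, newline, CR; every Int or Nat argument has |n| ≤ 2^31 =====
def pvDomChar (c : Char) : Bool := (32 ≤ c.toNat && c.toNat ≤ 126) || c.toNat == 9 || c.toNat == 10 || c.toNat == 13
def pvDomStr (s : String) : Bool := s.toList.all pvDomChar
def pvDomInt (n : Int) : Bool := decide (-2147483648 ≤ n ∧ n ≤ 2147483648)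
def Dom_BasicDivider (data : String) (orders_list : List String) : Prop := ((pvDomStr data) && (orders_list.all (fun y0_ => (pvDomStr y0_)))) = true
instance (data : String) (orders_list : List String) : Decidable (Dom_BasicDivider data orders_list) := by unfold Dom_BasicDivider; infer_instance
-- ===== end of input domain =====

-- B replaces A's three passes (index table, slicing, joining) by one pass with a
-- current-chunk accumulator; objective: simpler.

-- ===== PORT A =====
-- literal transliteration of A: index collection, slicing between consecutive
-- indices, then joining.  order_index[x] is read with pyGetD (always in range here).
def BasicDivider (data : String) (orders_list : List String) : List String :=
  if PySem.Str.len data = 0 then []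
  else
    let d := PySem.Str.split₀ data
    let order_index := (PySem.List.pyRange 0 (d.length : Int) 1).foldl
      (fun acc x => if PySem.List.pyGetD d x "" ∈ orders_list then acc ++ [x] else acc) []
    let order_index := order_index ++ [(d.length : Int)]
    let chunks := (PySem.List.pyRange 0 ((order_index.length : Int) - 1) 1).foldl
      (fun acc x => acc ++ [PySem.List.slice d (some (PySem.List.pyGetD order_index x 0))
                                              (some (PySem.List.pyGetD order_index (x + 1) 0))]) []
    chunks.foldl (fun out c => out ++ [PySem.Str.join " " c]) []

-- ===== PORT B =====
-- single pass: flush `cur` at each keyword, extend it otherwise; tokens before the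
-- first keyword are skipped (cur = none).
def pvGoB (orders : List String) : List String → List String → Option (List String) → List String
  | [], out, none => out
  | [], out, some c => out ++ [PySem.Str.join " " c]
  | t :: ts, out, cur =>
    if t ∈ orders then
      match cur with
      | none => pvGoB orders ts out (some [t])
      | some c => pvGoB orders ts (out ++ [PySem.Str.join " " c]) (some [t])
    else
      match cur with
      | none => pvGoB orders ts out none
      | some c => pvGoB orders ts out (some (c ++ [t]))

def BasicDivider_alt (data : String) (orders_list : List String) : List String :=
  if PySem.Str.len data = 0 then []
  else pvGoB orders_list (PySem.Str.split₀ data) [] none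

-- ===== PRECONDITION & SPEC =====
def Spec_BasicDivider (data : String) (orders_list : List String) (out : List String) : Prop := out = BasicDivider_alt data orders_list
instance (data : String) (orders_list : List String) (out : List String) : Decidable (Spec_BasicDivider data orders_list out) := by unfold Spec_BasicDivider; infer_instance

-- ===== CLAIM (what is proved, stated in full; the proofs are below) =====
def Claim_equal_BasicDivider : Prop := ∀ (data : String) (orders_list : List String), Dom_BasicDivider data orders_list → Spec_BasicDivider data orders_list (BasicDivider data orders_list)

-- ===== LEMMAS AND PROOFS =====

-- proof-side mirror of B's chunking: pvChunks skips leading non-keywords,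
-- pvStart carries the current chunk.
def pvStart (orders : List String) (cur : List String) : List String → List (List String)
  | [] => [cur]
  | t :: ts => if t ∈ orders then cur :: pvStart orders [t] ts else pvStart orders (cur ++ [t]) ts

def pvChunks (orders : List String) : List String → List (List String)
  | [] => []
  | t :: ts => if t ∈ orders then pvStart orders [t] ts else pvChunks orders ts

-- proof-side mirror of A's data: keyword positions (Nat level) …
def pvIdx (orders : List String) : List String → List Nat
  | [] => []
  | t :: ts => if t ∈ orders then 0 :: (pvIdx orders ts).map (· + 1) else (pvIdx orders ts).map (· + 1)

-- … and the slices between consecutive positions.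
def pvPs (d : List String) : List Nat → List (List String)
  | [] => []
  | [_] => []
  | a :: b :: l => (d.drop a).take (b - a) :: pvPs d (b :: l)

theorem pvIdx_filter (orders : List String) (d : List String) :
    (List.range d.length).filter (fun i => decide (d.getD i "" ∈ orders)) = pvIdx orders d := by
  induction d with
  | nil => simp [pvIdx]
  | cons t ts ih =>
    rw [List.length_cons, List.range_succ_eq_map, pvIdx]
    by_cases h : t ∈ orders <;>
      simp [h, List.filter_map, Function.comp_def, ← ih] <;> rfl

theorem pvPs_shift (t : String) (d : List String) (l : List Nat) :
    pvPs (t :: d) (l.map (· + 1)) = pvPs d l := by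
  induction l with
  | nil => simp [pvPs]
  | cons a l ih =>
    cases l with
    | nil => simp [pvPs]
    | cons b l' =>
      simp only [List.map_cons] at ih ⊢
      simp only [pvPs, ih, List.drop_succ_cons]
      congr 2
      omega

theorem pvChunks_of_idx_nil (orders : List String) (ts : List String)
    (h : pvIdx orders ts = []) : pvChunks orders ts = [] := by
  induction ts with
  | nil => simp [pvChunks]
  | cons t ts ih =>
    rw [pvIdx] at h
    rw [pvChunks]
    by_cases ho : t ∈ orders
    · simp [ho] at h
    · simp only [ho, if_neg, ite_false]
      simp only [ho, ite_false] at h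
      exact ih (by simpa using h)

theorem takeWhile_of_idx_nil (orders : List String) (ts : List String)
    (h : pvIdx orders ts = []) : ts.takeWhile (fun t => !decide (t ∈ orders)) = ts := by
  induction ts with
  | nil => simp
  | cons t ts ih =>
    rw [pvIdx] at h
    by_cases ho : t ∈ orders
    · simp [ho] at h
    · simp only [ho, ite_false] at h
      simp [List.takeWhile_cons, ho, ih (by simpa using h)]

theorem take_of_idx_cons (orders : List String) (ts : List String) (a : Nat) (l : List Nat)
    (h : pvIdx orders ts = a :: l) : ts.take a = ts.takeWhile (fun t => !decide (t ∈ orders)) := by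
  induction ts generalizing a l with
  | nil => simp [pvIdx] at h
  | cons t ts ih =>
    rw [pvIdx] at h
    by_cases ho : t ∈ orders
    · simp only [ho, ite_true, List.cons.injEq] at h
      simp [List.takeWhile_cons, ho, ← h.1]
    · simp only [ho, ite_false] at h
      cases hi : pvIdx orders ts with
      | nil => rw [hi] at h; simp at h
      | cons a' l' =>
        rw [hi, List.map_cons] at h
        obtain ⟨h1, -⟩ := List.cons_eq_cons.mp h
        rw [← h1]
        simp [List.takeWhile_cons, ho, ih a' l' hi]

theorem pvStart_eq (orders : List String) (ts : List String) (cur : List String) :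
    pvStart orders cur ts = (cur ++ ts.takeWhile (fun t => !decide (t ∈ orders))) :: pvChunks orders ts := by
  induction ts generalizing cur with
  | nil => simp [pvStart, pvChunks]
  | cons t ts ih =>
    rw [pvStart, pvChunks]
    by_cases ho : t ∈ orders
    · simp [ho, List.takeWhile_cons]
    · simp [ho, List.takeWhile_cons, ih]

theorem pvPs_idx (orders : List String) (d : List String) :
    pvPs d (pvIdx orders d ++ [d.length]) = pvChunks orders d := by
  induction d with
  | nil => simp [pvIdx, pvPs, pvChunks]
  | cons t ts ih =>
    rw [pvIdx, pvChunks]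
    by_cases ho : t ∈ orders
    · simp only [ho, ite_true, List.length_cons]
      cases hi : pvIdx orders ts with
      | nil =>
        rw [hi] at ih
        simp only [List.map_nil]
        rw [pvStart_eq, takeWhile_of_idx_nil orders ts hi, pvChunks_of_idx_nil orders ts hi]
        simp [pvPs, List.take_of_length_le]
      | cons a l =>
        rw [hi] at ih
        simp only [List.map_cons, List.cons_append, pvPs]
        rw [show ((a + 1) :: (List.map (fun x => x + 1) l ++ [ts.length + 1]) : List Nat)
              = (a :: (l ++ [ts.length])).map (fun x => x + 1) from by simp,
            pvPs_shift t ts (a :: (l ++ [ts.length]))]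
        have hih : pvPs ts (a :: (l ++ [ts.length])) = pvChunks orders ts := ih
        rw [hih, pvStart_eq, ← take_of_idx_cons orders ts a l hi]
        simp [List.take_succ_cons]
    · simp only [ho, ite_false, List.length_cons]
      rw [show (List.map (fun x => x + 1) (pvIdx orders ts) ++ [ts.length + 1] : List Nat)
            = ((pvIdx orders ts) ++ [ts.length]).map (fun x => x + 1) from by simp,
          pvPs_shift t ts _, ih]

theorem pvGoB_eq (orders : List String) (ts : List String) (out : List String) (cur : Option (List String)) :
    pvGoB orders ts out cur
      = out ++ (match cur with
          | none => pvChunks orders ts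
          | some c => pvStart orders c ts).map (PySem.Str.join " ") := by
  induction ts generalizing out cur with
  | nil => cases cur <;> simp [pvGoB, pvChunks, pvStart]
  | cons t ts ih =>
    cases cur with
    | none =>
      by_cases ho : t ∈ orders <;> simp [pvGoB, pvChunks, ho, ih]
    | some c =>
      by_cases ho : t ∈ orders <;> simp [pvGoB, pvStart, ho, ih]

-- A's order_index list, at the Nat level, with getD reading it.
theorem pvGetD_cast (l : List Nat) (k : Nat) :
    PySem.List.pyGetD (l.map (fun i : Nat => (i : Int))) (k : Int) 0 = ((l.getD k 0 : Nat) : Int) := by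
  rw [PySem.List.pyGetD_natCast]
  rw [List.getD_eq_getElem?_getD, List.getD_eq_getElem?_getD, List.getElem?_map]
  cases l[k]? <;> simp

-- the chunk-building loop of A computes pvPs.
theorem pvChunkLoop (d : List String) (m : List Nat) :
    (List.range (m.length - 1)).map
        (fun (x : Nat) => PySem.List.slice d (some (PySem.List.pyGetD (m.map (fun i : Nat => (i : Int))) (x : Int) 0))
                                     (some (PySem.List.pyGetD (m.map (fun i : Nat => (i : Int))) ((x : Int) + 1) 0)))
      = pvPs d m := by
  induction m with
  | nil => simp [pvPs]
  | cons a m ih =>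
    cases m with
    | nil => simp [pvPs]
    | cons b m' =>
      simp only [List.length_cons] at ih ⊢
      rw [Nat.add_sub_cancel, List.range_succ_eq_map, List.map_cons, List.map_map, pvPs]
      congr 1
      · have h1 := pvGetD_cast (a :: b :: m') 0
        have h2 := pvGetD_cast (a :: b :: m') 1
        rw [h1, (by norm_num : (((0 : Nat) : Int) + 1) = ((1 : Nat) : Int)), h2,
            PySem.List.slice_toNat _ (by positivity) (by positivity)]
        simp [List.getD]
      · rw [Nat.add_sub_cancel] at ih
        rw [← ih]
        apply List.map_congr_left
        intro x _
        have hx : ((x + 1 : Nat) : Int) = (x : Int) + 1 := by push_cast; ring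
        have hx1 : ((x + 1 + 1 : Nat) : Int) = ((x + 1 : Nat) : Int) + 1 := by push_cast; ring
        simp only [Function.comp]
        rw [← hx, ← hx1, pvGetD_cast, pvGetD_cast, pvGetD_cast, pvGetD_cast]
        simp [List.getD]

-- ===== VERDICT (by name: the statement is the Claim_ definition above) =====
set_option maxHeartbeats 1000000 in
theorem BasicDivider_spec : Claim_equal_BasicDivider := by
  intro data orders_list _
  unfold Spec_BasicDivider BasicDivider BasicDivider_alt
  by_cases h0 : PySem.Str.len data = 0
  · rw [if_pos h0, if_pos h0]
  · rw [if_neg h0, if_neg h0]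
    simp only []
    set d := PySem.Str.split₀ data with hd
    -- A side, step 1: the index loop is a filter over the range
    rw [PySem.List.foldl_append_ite_eq_filter]
    have hrange : PySem.List.pyRange 0 (d.length : Int) 1 = (List.range d.length).map (fun i : Nat => (i : Int)) := by
      rw [PySem.List.pyRange_one]; simp
    rw [hrange, List.filter_map, List.nil_append]
    have hfil : (List.range d.length).filter ((fun x => decide (PySem.List.pyGetD d x "" ∈ orders_list)) ∘ (fun i : Nat => (i : Int)))
        = pvIdx orders_list d := by
      rw [← pvIdx_filter orders_list d]
      apply List.filter_congr
      intro i _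
      simp [PySem.List.pyGetD_natCast]
    rw [hfil]
    -- A side, steps 2+3: the slice loop is pvPs, the join loop is a map
    rw [PySem.List.foldl_append_singleton_eq_map, PySem.List.foldl_append_singleton_eq_map]
    have hm : (pvIdx orders_list d).map (fun i : Nat => (i : Int)) ++ [(d.length : Int)]
        = ((pvIdx orders_list d) ++ [d.length]).map (fun i : Nat => (i : Int)) := by simp
    set m : List Nat := pvIdx orders_list d ++ [d.length] with hmdef
    have hlen : ((m.map (fun i : Nat => (i : Int))).length : Int) - 1 = ((m.length - 1 : Nat) : Int) := by
      have : 1 ≤ m.length := by simp [hmdef]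
      simp only [List.length_map]
      omega
    rw [hm, hlen]
    have hrange2 : PySem.List.pyRange 0 ((m.length - 1 : Nat) : Int) 1
        = (List.range (m.length - 1)).map (fun i : Nat => (i : Int)) := by
      rw [PySem.List.pyRange_one]; simp
    rw [hrange2, List.nil_append, List.map_map]
    have := pvChunkLoop d m
    rw [show ((List.range (m.length - 1)).map
          ((fun x => PySem.List.slice d (some (PySem.List.pyGetD (m.map (fun i : Nat => (i : Int))) x 0))
                (some (PySem.List.pyGetD (m.map (fun i : Nat => (i : Int))) (x + 1) 0))) ∘ (fun i : Nat => (i : Int))))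
        = pvPs d m from by rw [← this]; rfl]
    rw [hmdef, pvPs_idx]
    -- B side
    rw [pvGoB_eq]
    simp
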